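-- pv_equiv track=rewrite | github.com/genenetwork/genenetwork2 | wqflask/wqflask/correlation/correlationFunction.py | findIdenticalControlTraits
-- ===== SOURCE A (Python) =====
-- def findIdenticalControlTraits ( controlVals, controlNames ):
--     nameOfIdenticalTraits = []
--
--     controlTraitNumber = len(controlVals)
--
--     if controlTraitNumber > 1:
--
--         #XZ: reset the precision of values and convert to string type
--         for oneTraitVal in controlVals:
--             for oneStrainVal in oneTraitVal:
--                 oneStrainVal = '%.3f' % oneStrainVal
--
--         for i, oneTraitVal in enumerate( controlVals ):
--             for j in range(i+1, controlTraitNumber):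
--                 if oneTraitVal == controlVals[j]:
--                     nameOfIdenticalTraits.append(controlNames[i])
--                     nameOfIdenticalTraits.append(controlNames[j])
--
--     return nameOfIdenticalTraits
-- ===== SOURCE B (Python) =====
-- def findIdenticalControlTraits(controlVals, controlNames):
--     # One right-to-left pass records, for every index i, the ascending list of the
--     # later indices whose value list is identical (via a dict value-tuple -> indices);
--     # a second pass emits the names, in the same (i, j)-lexicographic order as the
--     # quadratic pairwise scan.
--     later = {}
--     succ = []
--     for i, v in reversed(list(enumerate(controlVals))):
--         key = tuple(v)
--         prev = later.get(key, [])
--         succ.append((i, prev))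
--         later[key] = [i] + prev
--     out = []
--     for i, js in reversed(succ):
--         for j in js:
--             out.append(controlNames[i])
--             out.append(controlNames[j])
--     return out
-- ===== Notes on version B (the rewrite author's own statement) =====
-- stated objective: faster
-- what changed: replaces the all-pairs value-list comparison with a single right-to-left pass that builds, via a dict keyed by the value tuple, the list of later identical indices for every trait, then one emission pass; same (i,j)-lexicographic output order
import Mathlib
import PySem

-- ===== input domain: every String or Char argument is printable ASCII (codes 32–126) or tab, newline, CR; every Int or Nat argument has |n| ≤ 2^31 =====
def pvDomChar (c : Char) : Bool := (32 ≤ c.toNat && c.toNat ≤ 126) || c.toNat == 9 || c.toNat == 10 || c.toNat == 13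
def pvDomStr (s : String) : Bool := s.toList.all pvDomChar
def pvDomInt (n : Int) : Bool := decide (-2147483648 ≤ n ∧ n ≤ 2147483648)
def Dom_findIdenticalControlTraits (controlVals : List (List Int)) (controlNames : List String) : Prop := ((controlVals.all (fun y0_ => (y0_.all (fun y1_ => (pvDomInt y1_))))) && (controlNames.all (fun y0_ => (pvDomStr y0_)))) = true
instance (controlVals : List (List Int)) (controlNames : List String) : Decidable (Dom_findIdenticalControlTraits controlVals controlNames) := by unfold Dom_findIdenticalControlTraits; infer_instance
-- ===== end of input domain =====

-- B replaces A's all-pairs comparison by one right-to-left dict pass recording each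
-- trait's later identical indices, then one emission pass (objective: faster).

-- ===== PORT A =====
-- the Python '%.3f' loop only rebinds its loop variable (no effect on any state): nothing to port
def findIdenticalControlTraits (controlVals : List (List Int)) (controlNames : List String) : List String :=
  let controlTraitNumber : Int := controlVals.length
  if controlTraitNumber > 1 then
    (PySem.List.enumerate controlVals).foldl (fun acc p =>
      (PySem.List.pyRange (p.1 + 1) controlTraitNumber 1).foldl (fun acc j =>
        if p.2 == PySem.List.pyGetD controlVals j [] then
          acc ++ [PySem.List.pyGetD controlNames p.1 "", PySem.List.pyGetD controlNames j ""]
        else acc) acc) []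
  else []

-- ===== PORT B =====
-- 'reversed(list(enumerate(...)))' building succ front-to-back = foldr over the enumerate list
def findIdenticalControlTraits_alt (controlVals : List (List Int)) (controlNames : List String) : List String :=
  let succ : List (Int × List Int) :=
    ((PySem.List.enumerate controlVals).foldr
      (fun p st =>
        let prev := st.1.getD p.2 []
        (st.1.insert p.2 (p.1 :: prev), (p.1, prev) :: st.2))
      ((PySem.Dict.empty : PySem.Dict (List Int) (List Int)), [])).2
  succ.foldl (fun acc q =>
    q.2.foldl (fun acc j =>
      acc ++ [PySem.List.pyGetD controlNames q.1 "", PySem.List.pyGetD controlNames j ""]) acc) []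

-- ===== PRECONDITION & SPEC =====
-- Pre_ excludes exactly the inputs on which the Python raises IndexError: a pair of
-- identical value lists whose second index is out of range of controlNames.
def Pre_findIdenticalControlTraits (controlVals : List (List Int)) (controlNames : List String) : Prop :=
  ∀ p ∈ PySem.List.enumerate controlVals,
    ∀ j ∈ PySem.List.pyRange (p.1 + 1) controlVals.length 1,
      p.2 = PySem.List.pyGetD controlVals j [] → j < (controlNames.length : Int)
instance (controlVals : List (List Int)) (controlNames : List String) : Decidable (Pre_findIdenticalControlTraits controlVals controlNames) := by unfold Pre_findIdenticalControlTraits; infer_instance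

def pvWitness_findIdenticalControlTraits : List (List Int) × List String :=
  ([[1, 2], [3], [1, 2]], ["x", "y", "z"])

def Spec_findIdenticalControlTraits (controlVals : List (List Int)) (controlNames : List String) (out : List String) : Prop := out = findIdenticalControlTraits_alt controlVals controlNames
instance (controlVals : List (List Int)) (controlNames : List String) (out : List String) : Decidable (Spec_findIdenticalControlTraits controlVals controlNames out) := by unfold Spec_findIdenticalControlTraits; infer_instance

-- ===== CLAIM (what is proved, stated in full; the proofs are below) =====
def Claim_equal_findIdenticalControlTraits : Prop := ∀ (controlVals : List (List Int)) (controlNames : List String), Dom_findIdenticalControlTraits controlVals controlNames → Pre_findIdenticalControlTraits controlVals controlNames → Spec_findIdenticalControlTraits controlVals controlNames (findIdenticalControlTraits controlVals controlNames)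

-- ===== LEMMAS AND PROOFS =====

-- the "later identical indices" lists that B's right-to-left pass computes, in spec form
def pvSuccSpec : List (Int × List Int) → List (Int × List Int)
  | [] => []
  | p :: rest => (p.1, (rest.filter (fun q => q.2 == p.2)).map (fun q => q.1)) :: pvSuccSpec rest

theorem pv_enumerate_eq_map_range (xs : List (List Int)) :
    ∀ s : Int, PySem.List.enumerate xs s
      = (PySem.List.pyRange s (s + xs.length) 1).map
          (fun j => (j, PySem.List.pyGetD xs (j - s) [])) := by
  induction xs with
  | nil => intro s; simp [PySem.List.enumerate_nil, PySem.List.pyRange_one_eq_nil]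
  | cons x xs ih =>
    intro s
    rw [PySem.List.enumerate_cons, PySem.List.pyRange_one_cons (by simp), List.map_cons]
    congr 1
    · simp [PySem.List.pyGetD_zero_cons]
    · rw [ih (s + 1)]
      have hb : s + ((x :: xs).length : Int) = (s + 1) + (xs.length : Int) := by
        simp; omega
      rw [hb]
      apply List.map_congr_left
      intro j hj
      rw [PySem.List.mem_pyRange_one] at hj
      have h1 : j - s = ((j - (s+1)).toNat + 1 : Int) := by omega
      have h2 : j - (s + 1) = ((j - (s+1)).toNat : Int) := by omega
      rw [h2, h1, PySem.List.pyGetD_natCast]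
      have : ((((j - (s+1)).toNat + 1 : Int))) = (((j - (s+1)).toNat + 1 : Nat) : Int) := by push_cast; ring
      rw [this, PySem.List.pyGetD_natCast, List.getD_cons_succ]

theorem pv_pyGetD_cons_shift (x : List Int) (xs : List (List Int)) (i : Int) (h : 1 ≤ i) :
    PySem.List.pyGetD (x :: xs) i [] = PySem.List.pyGetD xs (i - 1) [] := by
  have h2 : i - 1 = ((i - 1).toNat : Int) := by omega
  have h1 : i = (((i - 1).toNat + 1 : Nat) : Int) := by push_cast; omega
  rw [h2, PySem.List.pyGetD_natCast, h1, PySem.List.pyGetD_natCast, List.getD_cons_succ]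
  congr 1
  omega

-- the filtered enumerate suffix, rewritten as a filtered index range
theorem pv_suffix_filter (xs : List (List Int)) (s : Int) (v : List Int) :
    ((PySem.List.enumerate xs s).filter (fun q => q.2 == v)).map (fun q => q.1)
      = (PySem.List.pyRange s (s + xs.length) 1).filter
          (fun j => v == PySem.List.pyGetD xs (j - s) []) := by
  rw [pv_enumerate_eq_map_range xs s, List.filter_map, List.map_map]
  have h1 : (fun q : Int × List Int => q.1) ∘ (fun j => (j, PySem.List.pyGetD xs (j - s) [])) = id := rfl
  have h2 : ((fun q : Int × List Int => q.2 == v) ∘ (fun j => (j, PySem.List.pyGetD xs (j - s) [])))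
      = fun j => v == PySem.List.pyGetD xs (j - s) [] := by
    funext j; exact BEq.comm ..
  rw [h1, h2, List.map_id]

-- characterisation of pvSuccSpec on an enumerate list
theorem pv_succSpec_char (xs : List (List Int)) :
    ∀ s : Int, pvSuccSpec (PySem.List.enumerate xs s)
      = (PySem.List.enumerate xs s).map (fun p =>
          (p.1, (PySem.List.pyRange (p.1 + 1) (s + xs.length) 1).filter
            (fun j => p.2 == PySem.List.pyGetD xs (j - s) []))) := by
  induction xs with
  | nil => intro s; simp [PySem.List.enumerate_nil, pvSuccSpec]
  | cons x xs ih =>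
    intro s
    rw [PySem.List.enumerate_cons, List.map_cons]
    show (s, ((PySem.List.enumerate xs (s+1)).filter (fun q => q.2 == x)).map (fun q => q.1))
        :: pvSuccSpec (PySem.List.enumerate xs (s+1)) = _
    have hb : s + ((x :: xs).length : Int) = (s + 1) + (xs.length : Int) := by simp; omega
    congr 1
    · rw [pv_suffix_filter xs (s+1) x, hb]
      simp only [Prod.mk.injEq, true_and]
      apply List.filter_congr
      intro j hj
      rw [PySem.List.mem_pyRange_one] at hj
      have : PySem.List.pyGetD (x :: xs) (j - s) [] = PySem.List.pyGetD xs (j - (s+1)) [] := by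
        have := pv_pyGetD_cons_shift x xs (j - s) (by omega)
        rw [this]; congr 1; omega
      rw [this]
    · rw [ih (s+1), hb]
      apply List.map_congr_left
      intro p hp
      have hp1 : p.1 ∈ (PySem.List.enumerate xs (s+1)).map (fun q => q.1) := List.mem_map_of_mem hp
      rw [PySem.List.map_fst_enumerate, PySem.List.mem_pyRange_one] at hp1
      simp only [Prod.mk.injEq, true_and]
      apply List.filter_congr
      intro j hj
      rw [PySem.List.mem_pyRange_one] at hj
      have : PySem.List.pyGetD (x :: xs) (j - s) [] = PySem.List.pyGetD xs (j - (s+1)) [] := by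
        have := pv_pyGetD_cons_shift x xs (j - s) (by omega)
        rw [this]; congr 1; omega
      rw [this]

-- B's right-to-left step function, named so the invariant can be stated about it
def pvStep (p : Int × List Int) (st : PySem.Dict (List Int) (List Int) × List (Int × List Int)) :
    PySem.Dict (List Int) (List Int) × List (Int × List Int) :=
  let prev := st.1.getD p.2 []
  (st.1.insert p.2 (p.1 :: prev), (p.1, prev) :: st.2)

def pvInit : PySem.Dict (List Int) (List Int) × List (Int × List Int) := (PySem.Dict.empty, [])

-- B's right-to-left foldr computes (group dict, pvSuccSpec) of its input list
theorem pv_foldr_invariant (ps : List (Int × List Int)) :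
    (∀ v : List Int,
      (ps.foldr pvStep pvInit).1.getD v []
        = ((ps.filter (fun q => q.2 == v)).map (fun q => q.1))) ∧
    ((ps.foldr pvStep pvInit).2 = pvSuccSpec ps) := by
  induction ps with
  | nil => exact ⟨fun v => by simp [pvInit, PySem.Dict.getD_empty], rfl⟩
  | cons p rest ih =>
    obtain ⟨ihD, ihS⟩ := ih
    constructor
    · intro v
      rw [List.foldr_cons]
      show ((rest.foldr pvStep pvInit).1.insert p.2 (p.1 :: (rest.foldr pvStep pvInit).1.getD p.2 [])).getD v [] = _
      rw [PySem.Dict.getD_insert, List.filter_cons]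
      by_cases h : v = p.2
      · have hbeq : (p.2 == v) = true := by simp [h]
        rw [if_pos h, hbeq, ihD p.2, h]
        simp
      · have hbeq : (p.2 == v) = false := by simp; exact fun hh => h hh.symm
        rw [if_neg h, hbeq, ihD v]
        simp
    · rw [List.foldr_cons]
      show (p.1, (rest.foldr pvStep pvInit).1.getD p.2 []) :: (rest.foldr pvStep pvInit).2 = _
      rw [ihD p.2, ihS]
      rfl

theorem pv_foldl_append_ite_flat {α β : Type} (P : β → Prop) [DecidablePred P]
    (g : β → List α) (l : List β) (init : List α) :
    l.foldl (fun acc x => if P x then acc ++ g x else acc) init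
      = init ++ (l.filter (fun x => decide (P x))).flatMap g := by
  induction l generalizing init with
  | nil => simp
  | cons x xs ih =>
    by_cases h : P x <;> simp [List.foldl_cons, h, ih, List.append_assoc]

theorem pv_mem_enum (xs : List (List Int)) (p : Int × List Int)
    (hp : p ∈ PySem.List.enumerate xs) : 0 ≤ p.1 ∧ p.1 < (xs.length : Int) := by
  have h : p.1 ∈ (PySem.List.enumerate xs).map (fun q => q.1) := List.mem_map_of_mem hp
  rw [PySem.List.map_fst_enumerate, PySem.List.mem_pyRange_one] at h
  omega

-- B's emission pass, as a flatMap
theorem pv_emit_flat (L : List (Int × List Int)) (controlNames : List String) :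
    L.foldl (fun acc q =>
        q.2.foldl (fun acc j =>
          acc ++ [PySem.List.pyGetD controlNames q.1 "", PySem.List.pyGetD controlNames j ""]) acc) []
      = L.flatMap (fun q =>
          q.2.flatMap (fun j =>
            [PySem.List.pyGetD controlNames q.1 "", PySem.List.pyGetD controlNames j ""])) := by
  have h1 : L.foldl (fun acc q =>
        q.2.foldl (fun acc j =>
          acc ++ [PySem.List.pyGetD controlNames q.1 "", PySem.List.pyGetD controlNames j ""]) acc) ([] : List String)
      = L.foldl (fun acc q =>
          acc ++ q.2.flatMap (fun j =>
            [PySem.List.pyGetD controlNames q.1 "", PySem.List.pyGetD controlNames j ""])) [] := by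
    apply PySem.List.foldl_congr_mem
    intro acc q hq
    exact PySem.List.foldl_append_eq_flatMap _ _ _
  rw [h1, PySem.List.foldl_append_eq_flatMap, List.nil_append]

theorem pv_AB (controlVals : List (List Int)) (controlNames : List String) :
    findIdenticalControlTraits controlVals controlNames = findIdenticalControlTraits_alt controlVals controlNames := by
  have hB : findIdenticalControlTraits_alt controlVals controlNames
      = (PySem.List.enumerate controlVals).flatMap (fun p =>
          ((PySem.List.pyRange (p.1 + 1) (controlVals.length : Int) 1).filter
            (fun j => p.2 == PySem.List.pyGetD controlVals j [])).flatMap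
            (fun j => [PySem.List.pyGetD controlNames p.1 "", PySem.List.pyGetD controlNames j ""])) := by
    have hport : findIdenticalControlTraits_alt controlVals controlNames
        = (((PySem.List.enumerate controlVals).foldr pvStep pvInit).2).foldl (fun acc q =>
            q.2.foldl (fun acc j =>
              acc ++ [PySem.List.pyGetD controlNames q.1 "", PySem.List.pyGetD controlNames j ""]) acc) [] := rfl
    rw [hport, (pv_foldr_invariant (PySem.List.enumerate controlVals)).2, pv_emit_flat]
    have hs := pv_succSpec_char controlVals 0
    rw [zero_add] at hs
    rw [hs, List.flatMap_map]
    apply List.flatMap_congr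
    intro p hp
    show ((PySem.List.pyRange (p.1 + 1) ((controlVals.length : Int)) 1).filter
            (fun j => p.2 == PySem.List.pyGetD controlVals (j - 0) [])).flatMap _ = _
    simp only [sub_zero]
  rw [hB]
  show (if ((controlVals.length : Int) > 1) then _ else _) = _
  by_cases hc : ((controlVals.length : Int) > 1)
  · rw [if_pos hc]
    have h1 : (PySem.List.enumerate controlVals).foldl (fun acc p =>
        (PySem.List.pyRange (p.1 + 1) (controlVals.length : Int) 1).foldl (fun acc j =>
          if p.2 == PySem.List.pyGetD controlVals j [] then
            acc ++ [PySem.List.pyGetD controlNames p.1 "", PySem.List.pyGetD controlNames j ""]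
          else acc) acc) ([] : List String)
        = (PySem.List.enumerate controlVals).foldl (fun acc p =>
            acc ++ ((PySem.List.pyRange (p.1 + 1) (controlVals.length : Int) 1).filter
              (fun j => decide ((p.2 == PySem.List.pyGetD controlVals j []) = true))).flatMap
              (fun j => [PySem.List.pyGetD controlNames p.1 "", PySem.List.pyGetD controlNames j ""])) [] :=
      by apply PySem.List.foldl_congr_mem; intro acc p hp; exact pv_foldl_append_ite_flat _ _ _ _
    rw [h1, PySem.List.foldl_append_eq_flatMap, List.nil_append]
    apply List.flatMap_congr
    intro p hp
    congr 1
    apply List.filter_congr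
    intro j hj
    exact Bool.decide_eq_true
  · rw [if_neg hc]
    symm
    apply List.flatMap_eq_nil_iff.mpr
    intro p hp
    obtain ⟨h0, hn⟩ := pv_mem_enum controlVals p hp
    have : PySem.List.pyRange (p.1 + 1) (controlVals.length : Int) 1 = [] :=
      PySem.List.pyRange_one_eq_nil (by omega)
    rw [this, List.filter_nil, List.flatMap_nil]

-- ===== VERDICT (by name: the statement is the Claim_ definition above) =====
theorem findIdenticalControlTraits_spec : Claim_equal_findIdenticalControlTraits := by
  intro controlVals controlNames _ _
  unfold Spec_findIdenticalControlTraits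
  exact pv_AB controlVals controlNames
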